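-- pv_equiv track=rewrite | github.com/Hugodjj/TEP | Semana 4/Problema I.py | precompute_golomb_sequence
-- ===== SOURCE A (Python) =====
-- def precompute_golomb_sequence(limit):
--
--     f = [0] * (limit + 1)
--     f[1] = 1
--     length = 1
--
--     for i in range(2, limit + 1):
--         f[i] = 1 + f[i - f[f[i - 1]]]
--
--         length += 1
--
--
--     cumulative_count = [0] * (limit + 1)
--     for i in range(1, limit + 1):
--         cumulative_count[i] = cumulative_count[i - 1] + f[i]
--
--     return f, cumulative_count
-- ===== SOURCE B (Python) =====
-- def precompute_golomb_sequence(limit):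
--     # Single fused pass: Golomb's self-describing run-length property
--     # (value v occupies positions cumulative_count[v-1]+1 .. cumulative_count[v]),
--     # using the cumulative sums themselves as the run boundaries.
--     f = [0] * (limit + 1)
--     cumulative_count = [0] * (limit + 1)
--     if limit >= 1:
--         f[1] = 1
--         cumulative_count[1] = 1
--     v = 1
--     for n in range(2, limit + 1):
--         if n > cumulative_count[v]:
--             v += 1
--         f[n] = v
--         cumulative_count[n] = cumulative_count[n - 1] + v
--     return f, cumulative_count
-- ===== Notes on version B (the rewrite author's own statement) =====
-- stated objective: faster
-- what changed: Replaces A's index-chasing double recurrence plus a separate prefix-sum loop by one fused pass that exploits Golomb's run-length self-description: it keeps the current value v and advances it exactly when the position passes the run boundary cumulative_count[v], filling both tables in a single loop with far fewer indexed reads.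
-- crash fix: On nonpositive limit A raises IndexError while writing the seed entry into a zero table that is too short, whereas B returns the zero-initialized tables unchanged. — e.g. on precompute_golomb_sequence(0): A raises IndexError, B returns ([0], [0])
import Mathlib
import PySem

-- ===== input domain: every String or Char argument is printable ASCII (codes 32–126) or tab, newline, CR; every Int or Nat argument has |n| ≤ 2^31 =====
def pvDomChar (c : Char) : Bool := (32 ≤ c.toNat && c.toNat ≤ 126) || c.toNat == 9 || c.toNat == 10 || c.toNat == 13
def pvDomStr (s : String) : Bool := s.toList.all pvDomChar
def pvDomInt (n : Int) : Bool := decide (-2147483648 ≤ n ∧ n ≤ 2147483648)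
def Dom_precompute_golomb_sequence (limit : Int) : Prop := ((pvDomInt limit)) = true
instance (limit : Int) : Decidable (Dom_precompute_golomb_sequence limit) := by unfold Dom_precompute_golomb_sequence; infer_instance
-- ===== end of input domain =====

-- B replaces A's index-chasing double recursion + second prefix-sum loop by one fused pass
-- driven by Golomb's run-length property, using the cumulative sums as run boundaries.
-- The local variable `length` of A is dead (written, never read); it is omitted from the port.

-- ===== PORT A =====
-- loop body of A's first loop: f[i] = 1 + f[i - f[f[i - 1]]]
def golStepA (f : List Int) (i : Int) : List Int :=
  PySem.List.pySetD f i
    (1 + PySem.List.pyGetD f (i - PySem.List.pyGetD f (PySem.List.pyGetD f (i - 1) 0) 0) 0)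

-- loop body of A's second loop: cumulative_count[i] = cumulative_count[i-1] + f[i]
def golStepC (f : List Int) (cc : List Int) (i : Int) : List Int :=
  PySem.List.pySetD cc i (PySem.List.pyGetD cc (i - 1) 0 + PySem.List.pyGetD f i 0)

def precompute_golomb_sequence (limit : Int) : List Int × List Int :=
  let f := PySem.List.pyRepeat [(0 : Int)] (limit + 1)      -- f = [0] * (limit + 1)
  let f := PySem.List.pySetD f 1 1                          -- f[1] = 1
  let f := (PySem.List.pyRange 2 (limit + 1) 1).foldl golStepA f
  let cc := PySem.List.pyRepeat [(0 : Int)] (limit + 1)     -- cumulative_count = [0] * (limit + 1)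
  let cc := (PySem.List.pyRange 1 (limit + 1) 1).foldl (golStepC f) cc
  (f, cc)

-- ===== PORT B =====
-- loop body of B: advance v past a completed run, write f[n] and cumulative_count[n]
def golStepB (st : List Int × List Int × Int) (n : Int) : List Int × List Int × Int :=
  let f := st.1
  let cc := st.2.1
  let v := st.2.2
  let v := if PySem.List.pyGetD cc v 0 < n then v + 1 else v
  let f := PySem.List.pySetD f n v
  let cc := PySem.List.pySetD cc n (PySem.List.pyGetD cc (n - 1) 0 + v)
  (f, cc, v)

def precompute_golomb_sequence_alt (limit : Int) : List Int × List Int :=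
  let f := PySem.List.pyRepeat [(0 : Int)] (limit + 1)
  let cc := PySem.List.pyRepeat [(0 : Int)] (limit + 1)
  let fc := if 1 ≤ limit then (PySem.List.pySetD f 1 1, PySem.List.pySetD cc 1 1) else (f, cc)
  let st := (PySem.List.pyRange 2 (limit + 1) 1).foldl golStepB (fc.1, fc.2, 1)
  (st.1, st.2.1)

-- ===== PRECONDITION & SPEC =====
-- A raises IndexError (f[1] on a list of length ≤ 1) whenever limit ≤ 0; Pre_ keeps limit ≥ 1.
def Pre_precompute_golomb_sequence (limit : Int) : Prop := 1 ≤ limit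
instance (limit : Int) : Decidable (Pre_precompute_golomb_sequence limit) := by unfold Pre_precompute_golomb_sequence; infer_instance

def pvWitness_precompute_golomb_sequence : Int := 5

-- On limit ≤ 0 the Python A raises IndexError while B returns the (possibly empty) zero tables.
def Raises_precompute_golomb_sequence (limit : Int) : Prop := limit ≤ 0
instance (limit : Int) : Decidable (Raises_precompute_golomb_sequence limit) := by unfold Raises_precompute_golomb_sequence; infer_instance
def pvRaiseWitness_precompute_golomb_sequence : Int := 0
def pvRaiseWitnessOut_precompute_golomb_sequence : List Int × List Int := ([0], [0])

def Spec_precompute_golomb_sequence (limit : Int) (out : List Int × List Int) : Prop := out = precompute_golomb_sequence_alt limit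
instance (limit : Int) (out : List Int × List Int) : Decidable (Spec_precompute_golomb_sequence limit out) := by unfold Spec_precompute_golomb_sequence; infer_instance

-- ===== CLAIM (what is proved, stated in full; the proofs are below) =====
def Claim_equal_precompute_golomb_sequence : Prop := ∀ (limit : Int), Dom_precompute_golomb_sequence limit → Pre_precompute_golomb_sequence limit → Spec_precompute_golomb_sequence limit (precompute_golomb_sequence limit)

def Claim_raises_precompute_golomb_sequence : Prop := (∀ (limit : Int), Dom_precompute_golomb_sequence limit → Raises_precompute_golomb_sequence limit → ¬ Pre_precompute_golomb_sequence limit) ∧ (Dom_precompute_golomb_sequence (pvRaiseWitness_precompute_golomb_sequence) ∧ Raises_precompute_golomb_sequence (pvRaiseWitness_precompute_golomb_sequence) ∧ precompute_golomb_sequence_alt (pvRaiseWitness_precompute_golomb_sequence) = pvRaiseWitnessOut_precompute_golomb_sequence)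

-- ===== LEMMAS AND PROOFS =====

-- The Golomb sequence, defined by its run-length self-description:
-- gol (n+1) increments over gol n exactly when position n+1 lies past the end
-- of the run of the value gol n (the run of v ends at position gS v).
-- The `min … (n+1)` clamps only serve termination: they are dropped by gol_step below.
def gol : Nat → Nat
  | 0 => 0
  | 1 => 1
  | n + 2 =>
    let v := gol (n + 1)
    if ((List.range (v + 1)).map (fun k => gol (min k (n + 1)))).sum < n + 2 then v + 1 else v
decreasing_by all_goals omega

-- partial sums: gS v = gol 1 + ⋯ + gol v  (gol 0 = 0)
def gS (v : Nat) : Nat := ((List.range (v + 1)).map gol).sum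

lemma gol_le (n : Nat) : gol n ≤ n := by
  induction n using Nat.strong_induction_on with
  | _ n ih =>
    match n with
    | 0 => simp [gol]
    | 1 => simp [gol]
    | n + 2 =>
      rw [gol]
      have h1 := ih (n + 1) (by omega)
      split <;> omega

lemma gol_step (n : Nat) :
    gol (n + 2) = if gS (gol (n + 1)) < n + 2 then gol (n + 1) + 1 else gol (n + 1) := by
  rw [gol]
  have hv : gol (n + 1) ≤ n + 1 := gol_le (n + 1)
  have : ((List.range (gol (n + 1) + 1)).map (fun k => gol (min k (n + 1)))).sum
      = gS (gol (n + 1)) := by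
    unfold gS
    congr 1
    apply List.map_congr_left
    intro k hk
    have : k < gol (n + 1) + 1 := List.mem_range.mp hk
    have : min k (n + 1) = k := by omega
    rw [this]
  rw [this]

lemma gol_pos (n : Nat) : 1 ≤ gol (n + 1) := by
  induction n with
  | zero => simp [gol]
  | succ n ih => rw [gol_step]; split <;> omega

lemma gS_succ (v : Nat) : gS (v + 1) = gS v + gol (v + 1) := by
  unfold gS
  rw [List.range_succ, List.map_append, List.sum_append]
  simp

lemma gS_zero : gS 0 = 0 := by simp [gS, gol]

lemma gS_lt (v w : Nat) (h : v < w) : gS v < gS w := by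
  induction w with
  | zero => omega
  | succ w ih =>
    rw [gS_succ]
    have := gol_pos w
    rcases Nat.lt_succ_iff_lt_or_eq.mp h with h' | h'
    · have := ih h'; omega
    · subst h'; omega

lemma gS_mono (v w : Nat) (h : v ≤ w) : gS v ≤ gS w := by
  rcases Nat.lt_or_ge v w with h' | h'
  · exact le_of_lt (gS_lt v w h')
  · have : v = w := by omega
    simp [this]

-- run invariant: position n+1 lies in the run of its own value
lemma gol_inv (n : Nat) : gS (gol (n + 1) - 1) < n + 1 ∧ n + 1 ≤ gS (gol (n + 1)) := by
  induction n with
  | zero =>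
    constructor
    · simp [gol, gS_zero]
    · show 1 ≤ gS (gol 1)
      have : gol 1 = 1 := by simp [gol]
      rw [this, gS_succ, gS_zero, this]
  | succ n ih =>
    rw [gol_step]
    split
    · rename_i h
      constructor
      · have he : gol (n + 1) + 1 - 1 = gol (n + 1) := by omega
        rw [he]
        omega
      · rw [gS_succ]
        have := gol_pos (gol (n + 1))
        omega
    · rename_i h
      exact ⟨by omega, by omega⟩

-- uniqueness: if m lies in the run of v+1 then gol m = v+1
lemma gol_eq_of_between (v m : Nat) (h1 : gS v < m) (h2 : m ≤ gS (v + 1)) : gol m = v + 1 := by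
  have hm : 1 ≤ m := by
    have := gS_mono 0 v (by omega)
    rw [gS_zero] at this
    omega
  obtain ⟨n, rfl⟩ : ∃ n, m = n + 1 := ⟨m - 1, by omega⟩
  obtain ⟨hl, hr⟩ := gol_inv n
  set w := gol (n + 1) with hw
  have hwp : 1 ≤ w := gol_pos n
  rcases Nat.lt_trichotomy w (v + 1) with h | h | h
  · have : gS w ≤ gS v := gS_mono w v (by omega)
    omega
  · exact h
  · have : gS (v + 1) ≤ gS (w - 1) := gS_mono (v + 1) (w - 1) (by omega)
    omega

-- the recurrence A computes, derived from the run-length definition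
lemma gol_rec (n : Nat) :
    1 ≤ gol (gol (n + 1)) ∧ gol (gol (n + 1)) ≤ n + 1 ∧
    gol (n + 2) = 1 + gol (n + 2 - gol (gol (n + 1))) := by
  have hvp : 1 ≤ gol (n + 1) := gol_pos n
  have hvle : gol (n + 1) ≤ n + 1 := gol_le (n + 1)
  have htp : 1 ≤ gol (gol (n + 1)) := by
    obtain ⟨u, hu⟩ : ∃ u, gol (n + 1) = u + 1 := ⟨gol (n + 1) - 1, by omega⟩
    rw [hu]; exact gol_pos u
  have htle : gol (gol (n + 1)) ≤ n + 1 := le_trans (gol_le _) hvle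
  refine ⟨htp, htle, ?_⟩
  obtain ⟨hl, hr⟩ := gol_inv n
  rw [gol_step]
  split
  · rename_i h
    -- new run: n + 2 = gS (gol (n+1)) + 1, and the argument lands at gS (gol (n+1) - 1) + 1
    have hn2 : n + 2 = gS (gol (n + 1)) + 1 := by omega
    obtain ⟨u, hu⟩ : ∃ u, gol (n + 1) = u + 1 := ⟨gol (n + 1) - 1, by omega⟩
    have hsucc : gS (gol (n + 1)) = gS u + gol (gol (n + 1)) := by
      rw [hu, gS_succ, ← hu]
    have harg : n + 2 - gol (gol (n + 1)) = gS u + 1 := by omega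
    rw [harg]
    have hg : gol (gS u + 1) = u + 1 := by
      apply gol_eq_of_between
      · omega
      · rw [← hu]; omega
    rw [hg, ← hu]
    omega
  · rename_i h
    -- continuing run: n + 2 ≤ gS (gol (n+1)); the argument lands in the previous run
    have hv2 : 2 ≤ gol (n + 1) := by
      by_contra hc
      have hv1 : gol (n + 1) = 1 := by omega
      have h1 : gS 1 = 1 := by
        have hg1 : gol 1 = 1 := by simp [gol]
        rw [gS_succ, gS_zero, hg1]
      rw [hv1, h1] at h
      omega
    obtain ⟨u, hu⟩ : ∃ u, gol (n + 1) = u + 2 := ⟨gol (n + 1) - 2, by omega⟩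
    have hs1 : gS (u + 1) = gS u + gol (u + 1) := gS_succ u
    have hs2 : gS (u + 2) = gS (u + 1) + gol (u + 2) := gS_succ (u + 1)
    have hstep : gol (u + 2) ≤ gol (u + 1) + 1 := by
      rw [gol_step]; split <;> omega
    have htv : gol (gol (n + 1)) = gol (u + 2) := by rw [hu]
    have hlu : gS (u + 1) < n + 1 := by
      have : gol (n + 1) - 1 = u + 1 := by omega
      rw [this] at hl
      exact hl
    have hru : n + 2 ≤ gS (u + 2) := by rw [← hu]; omega
    have hg : gol (n + 2 - gol (gol (n + 1))) = u + 1 := by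
      apply gol_eq_of_between
      · omega
      · omega
    rw [hg, hu]
    omega

-- the ideal tables
def golF (m : Nat) : List Int := (List.range m).map (fun k => (gol k : Int))
def golC (m : Nat) : List Int := (List.range m).map (fun k => (gS k : Int))

lemma length_golF (m : Nat) : (golF m).length = m := by simp [golF]
lemma length_golC (m : Nat) : (golC m).length = m := by simp [golC]

lemma golF_getD (m k : Nat) (h : k < m) : (golF m).getD k 0 = (gol k : Int) := by
  simp [golF, List.getD, h]

lemma golC_getD (m k : Nat) (h : k < m) : (golC m).getD k 0 = (gS k : Int) := by
  simp [golC, List.getD, h]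

lemma golF_succ (m : Nat) : golF (m + 1) = golF m ++ [(gol m : Int)] := by
  simp [golF, List.range_succ]

lemma golC_succ (m : Nat) : golC (m + 1) = golC m ++ [(gS m : Int)] := by
  simp [golC, List.range_succ]

-- generic: setting position (len P) of P ++ 0-padding extends the prefix
lemma set_pad (P : List Int) (z : Nat) (hz : 1 ≤ z) (v : Int) :
    (P ++ List.replicate z 0).set P.length v = (P ++ [v]) ++ List.replicate (z - 1) 0 := by
  obtain ⟨z', rfl⟩ : ∃ z', z = z' + 1 := ⟨z - 1, by omega⟩
  rw [List.replicate_succ, List.set_append_right _ _ (by omega)]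
  simp

lemma getD_pad (P : List Int) (z k : Nat) (h : k < P.length) :
    (P ++ List.replicate z 0).getD k 0 = P.getD k 0 := by
  simp [List.getD, List.getElem?_append_left h]

lemma golF_two : golF 2 = [0, 1] := by
  rw [golF, show List.range 2 = [0, 1] from rfl]
  simp [gol]

lemma golC_two : golC 2 = [0, 1] := by
  rw [golC, show List.range 2 = [0, 1] from rfl]
  have h1 : gS 1 = 1 := by
    rw [gS_succ, gS_zero, show gol 1 = 1 by simp [gol]]
  simp [gS_zero, h1]

lemma golC_one : golC 1 = [0] := by
  rw [golC, show List.range 1 = [0] from rfl]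
  simp [gS_zero]

lemma pyGetD_pad (P : List Int) (z k : Nat) (h : k < P.length) :
    PySem.List.pyGetD (P ++ List.replicate z 0) ((k : Nat) : Int) 0 = P.getD k 0 := by
  rw [PySem.List.pyGetD_natCast]
  exact getD_pad P z k h

-- A's first loop computes golF
lemma A_loop (L j : Nat) (hL : 1 ≤ L) (hj : j ≤ L - 1) :
    (PySem.List.pyRange 2 (2 + (j : Int)) 1).foldl golStepA
      (golF 2 ++ List.replicate (L - 1) 0)
    = golF (j + 2) ++ List.replicate (L - 1 - j) 0 := by
  induction j with
  | zero =>
    rw [show ((0:Nat):Int) = 0 by simp, show (2:Int) + 0 = 2 by ring,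
      PySem.List.pyRange_one_eq_nil (by omega)]
    rfl
  | succ j ih =>
    have hrange : PySem.List.pyRange 2 (2 + ((j + 1 : Nat) : Int)) 1
        = PySem.List.pyRange 2 (2 + (j : Int)) 1 ++ [2 + (j : Int)] := by
      have h2 : (2 : Int) + ((j + 1 : Nat) : Int) = (2 + (j : Int)) + 1 := by push_cast; ring
      rw [h2, PySem.List.pyRange_one_succ_right (by omega)]
    rw [hrange, List.foldl_append, ih (by omega)]
    simp only [List.foldl_cons, List.foldl_nil]
    have hlenP : (golF (j + 2)).length = j + 2 := length_golF _
    obtain ⟨ht1, ht2, hrec⟩ := gol_rec j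
    have hz : 1 ≤ L - 1 - j := by omega
    have hle : gol (j + 1) ≤ j + 1 := gol_le (j + 1)
    unfold golStepA
    have e1 : (2 : Int) + (j : Int) - 1 = ((j + 1 : Nat) : Int) := by push_cast; ring
    rw [e1, pyGetD_pad _ _ _ (by omega), golF_getD _ _ (by omega),
      pyGetD_pad _ _ _ (by omega), golF_getD _ _ (by omega)]
    have e2 : (2 : Int) + (j : Int) - ((gol (gol (j + 1)) : Nat) : Int)
        = ((j + 2 - gol (gol (j + 1)) : Nat) : Int) := by omega
    rw [e2, pyGetD_pad _ _ _ (by omega), golF_getD _ _ (by omega)]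
    have e3 : (1 : Int) + ((gol (j + 2 - gol (gol (j + 1))) : Nat) : Int)
        = ((gol (j + 2) : Nat) : Int) := by exact_mod_cast hrec.symm
    have e4 : (2 : Int) + (j : Int) = ((j + 2 : Nat) : Int) := by push_cast; ring
    have hset := set_pad (golF (j + 2)) (L - 1 - j) hz ((gol (j + 2) : Nat) : Int)
    rw [hlenP] at hset
    rw [e3, e4, PySem.List.pySetD_natCast, hset, ← golF_succ,
      show j + 2 + 1 = j + 1 + 2 by omega, show L - 1 - j - 1 = L - 1 - (j + 1) by omega]

-- A's second loop computes golC
lemma C_loop (L j : Nat) (f : List Int) (hf : ∀ k, k ≤ L → PySem.List.pyGetD f ((k : Nat) : Int) 0 = (gol k : Int)) (hj : j ≤ L) :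
    (PySem.List.pyRange 1 (1 + (j : Int)) 1).foldl (golStepC f)
      (golC 1 ++ List.replicate L 0)
    = golC (j + 1) ++ List.replicate (L - j) 0 := by
  induction j with
  | zero =>
    rw [show ((0:Nat):Int) = 0 by simp, show (1:Int) + 0 = 1 by ring,
      PySem.List.pyRange_one_eq_nil (by omega)]
    simp
  | succ j ih =>
    have hrange : PySem.List.pyRange 1 (1 + ((j + 1 : Nat) : Int)) 1
        = PySem.List.pyRange 1 (1 + (j : Int)) 1 ++ [1 + (j : Int)] := by
      have h2 : (1 : Int) + ((j + 1 : Nat) : Int) = (1 + (j : Int)) + 1 := by push_cast; ring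
      rw [h2, PySem.List.pyRange_one_succ_right (by omega)]
    rw [hrange, List.foldl_append, ih (by omega)]
    simp only [List.foldl_cons, List.foldl_nil]
    have hlenP : (golC (j + 1)).length = j + 1 := length_golC _
    have hz : 1 ≤ L - j := by omega
    unfold golStepC
    have e1 : (1 : Int) + (j : Int) - 1 = ((j : Nat) : Int) := by ring
    have e4 : (1 : Int) + (j : Int) = ((j + 1 : Nat) : Int) := by push_cast; ring
    rw [e1, pyGetD_pad _ _ _ (by omega), golC_getD _ _ (by omega), e4,
      hf (j + 1) (by omega)]
    have e3 : ((gS j : Nat) : Int) + ((gol (j + 1) : Nat) : Int) = ((gS (j + 1) : Nat) : Int) := by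
      rw [gS_succ]; push_cast; ring
    have hset := set_pad (golC (j + 1)) (L - j) hz ((gS (j + 1) : Nat) : Int)
    rw [hlenP] at hset
    rw [e3, PySem.List.pySetD_natCast, hset, ← golC_succ,
      show L - j - 1 = L - (j + 1) by omega]

-- B's loop invariant: f and cumulative_count filled through position j+1, v = gol (j+1)
lemma B_loop (L j : Nat) (hL : 1 ≤ L) (hj : j ≤ L - 1) :
    (PySem.List.pyRange 2 (2 + (j : Int)) 1).foldl golStepB
      (golF 2 ++ List.replicate (L - 1) 0, golF 2 ++ List.replicate (L - 1) 0, 1)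
    = (golF (j + 2) ++ List.replicate (L - 1 - j) 0,
       golC (j + 2) ++ List.replicate (L - 1 - j) 0,
       ((gol (j + 1) : Nat) : Int)) := by
  induction j with
  | zero =>
    rw [show ((0:Nat):Int) = 0 by simp, show (2:Int) + 0 = 2 by ring,
      PySem.List.pyRange_one_eq_nil (by omega)]
    simp [gol, golF_two, golC_two]
  | succ j ih =>
    have hrange : PySem.List.pyRange 2 (2 + ((j + 1 : Nat) : Int)) 1
        = PySem.List.pyRange 2 (2 + (j : Int)) 1 ++ [2 + (j : Int)] := by
      have h2 : (2 : Int) + ((j + 1 : Nat) : Int) = (2 + (j : Int)) + 1 := by push_cast; ring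
      rw [h2, PySem.List.pyRange_one_succ_right (by omega)]
    rw [hrange, List.foldl_append, ih (by omega)]
    simp only [List.foldl_cons, List.foldl_nil]
    have hlenF : (golF (j + 2)).length = j + 2 := length_golF _
    have hlenC : (golC (j + 2)).length = j + 2 := length_golC _
    have hz : 1 ≤ L - 1 - j := by omega
    have hle : gol (j + 1) ≤ j + 1 := gol_le (j + 1)
    unfold golStepB
    simp only
    -- the advanced value equals gol (j + 2)
    have hv' : (if PySem.List.pyGetD (golC (j + 2) ++ List.replicate (L - 1 - j) 0)
          ((gol (j + 1) : Nat) : Int) 0 < 2 + (j : Int)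
        then ((gol (j + 1) : Nat) : Int) + 1 else ((gol (j + 1) : Nat) : Int))
        = ((gol (j + 2) : Nat) : Int) := by
      rw [pyGetD_pad _ _ _ (by omega), golC_getD _ _ (by omega), gol_step j]
      by_cases h : gS (gol (j + 1)) < j + 2
      · rw [if_pos (by omega), if_pos h]; push_cast; ring
      · rw [if_neg (by omega), if_neg h]
    rw [hv']
    have e1 : (2 : Int) + (j : Int) - 1 = ((j + 1 : Nat) : Int) := by push_cast; ring
    have e4 : (2 : Int) + (j : Int) = ((j + 2 : Nat) : Int) := by push_cast; ring
    rw [e1, pyGetD_pad _ _ _ (by omega), golC_getD _ _ (by omega), e4]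
    have e3 : ((gS (j + 1) : Nat) : Int) + ((gol (j + 2) : Nat) : Int) = ((gS (j + 2) : Nat) : Int) := by
      have h2 := gS_succ (j + 1)
      rw [show j + 1 + 1 = j + 2 by omega] at h2
      rw [h2]; push_cast; ring
    have hsetF := set_pad (golF (j + 2)) (L - 1 - j) hz ((gol (j + 2) : Nat) : Int)
    rw [hlenF] at hsetF
    have hsetC := set_pad (golC (j + 2)) (L - 1 - j) hz ((gS (j + 2) : Nat) : Int)
    rw [hlenC] at hsetC
    rw [e3, PySem.List.pySetD_natCast, PySem.List.pySetD_natCast, hsetF, hsetC,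
      ← golF_succ, ← golC_succ, show j + 2 + 1 = j + 1 + 2 by omega,
      show L - 1 - j - 1 = L - 1 - (j + 1) by omega]

-- common shape of the initial tables for limit = L ≥ 1
lemma init_table (L : Nat) (hL : 1 ≤ L) :
    PySem.List.pySetD (PySem.List.pyRepeat [(0 : Int)] ((L : Int) + 1)) 1 1
      = golF 2 ++ List.replicate (L - 1) 0 := by
  rw [PySem.List.pyRepeat_singleton, show ((L : Int) + 1).toNat = L + 1 by omega,
    PySem.List.pySetD_of_nonneg _ _ (by omega), show ((1 : Int)).toNat = 1 by rfl,
    golF_two]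
  obtain ⟨L', rfl⟩ : ∃ L', L = L' + 1 := ⟨L - 1, by omega⟩
  simp [List.replicate_succ]

-- ===== VERDICT (by name: the statement is the Claim_ definition above) =====
theorem precompute_golomb_sequence_spec : Claim_equal_precompute_golomb_sequence := by
  intro limit _ hpre
  unfold Pre_precompute_golomb_sequence at hpre
  unfold Spec_precompute_golomb_sequence
  obtain ⟨L, rfl⟩ : ∃ L : Nat, limit = (L : Int) := ⟨limit.toNat, by omega⟩
  have hL : 1 ≤ L := by exact_mod_cast hpre
  have hrepeat : PySem.List.pyRepeat [(0 : Int)] ((L : Int) + 1) = List.replicate (L + 1) 0 := by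
    rw [PySem.List.pyRepeat_singleton, show ((L : Int) + 1).toNat = L + 1 by omega]
  have hccinit : List.replicate (L + 1) (0 : Int) = golC 1 ++ List.replicate L 0 := by
    rw [golC_one, List.replicate_succ]
    rfl
  have hrange2 : PySem.List.pyRange 2 ((L : Int) + 1) 1
      = PySem.List.pyRange 2 (2 + ((L - 1 : Nat) : Int)) 1 := by
    congr 1
    omega
  have hrange1 : PySem.List.pyRange 1 ((L : Int) + 1) 1
      = PySem.List.pyRange 1 (1 + ((L : Nat) : Int)) 1 := by
    congr 1
    ring
  have hA1 : (PySem.List.pyRange 2 ((L : Int) + 1) 1).foldl golStepA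
      (PySem.List.pySetD (PySem.List.pyRepeat [(0 : Int)] ((L : Int) + 1)) 1 1) = golF (L + 1) := by
    rw [init_table L hL, hrange2, A_loop L (L - 1) hL le_rfl,
      show L - 1 + 2 = L + 1 by omega, show L - 1 - (L - 1) = 0 by omega]
    simp
  have hf : ∀ k, k ≤ L → PySem.List.pyGetD (golF (L + 1)) ((k : Nat) : Int) 0 = (gol k : Int) := by
    intro k hk
    rw [PySem.List.pyGetD_natCast]
    exact golF_getD _ _ (by omega)
  have hA2 : (PySem.List.pyRange 1 ((L : Int) + 1) 1).foldl (golStepC (golF (L + 1)))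
      (PySem.List.pyRepeat [(0 : Int)] ((L : Int) + 1)) = golC (L + 1) := by
    rw [hrepeat, hccinit, hrange1, C_loop L L (golF (L + 1)) hf le_rfl,
      show L - L = 0 by omega]
    simp
  have hB : (PySem.List.pyRange 2 ((L : Int) + 1) 1).foldl golStepB
      (PySem.List.pySetD (PySem.List.pyRepeat [(0 : Int)] ((L : Int) + 1)) 1 1,
       PySem.List.pySetD (PySem.List.pyRepeat [(0 : Int)] ((L : Int) + 1)) 1 1, 1)
      = (golF (L + 1), golC (L + 1), ((gol L : Nat) : Int)) := by
    rw [init_table L hL, hrange2, B_loop L (L - 1) hL le_rfl,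
      show L - 1 + 2 = L + 1 by omega, show L - 1 - (L - 1) = 0 by omega,
      show L - 1 + 1 = L by omega]
    simp
  unfold precompute_golomb_sequence precompute_golomb_sequence_alt
  simp only [if_pos (show (1 : Int) ≤ (L : Int) by exact_mod_cast hL)]
  rw [hA1, hA2, hB]

def precompute_golomb_sequence_raises : Claim_raises_precompute_golomb_sequence := by
  unfold Claim_raises_precompute_golomb_sequence
  constructor
  · intro limit _ hr
    unfold Raises_precompute_golomb_sequence at hr
    unfold Pre_precompute_golomb_sequence
    omega
  · refine ⟨by decide, by decide, by decide⟩
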